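-- pv_equiv track=rewrite | github.com/nabazar/SpaceOptimization | ga_utilities.py | calc_nodes_numbers
-- ===== SOURCE A (Python) =====
-- def calc_nodes_numbers(n):
--     nodes_numbers = [0] * (n + 1)
--
--     for i in range(2, n + 1):
--         left_bound = 0
--         right_bound = i - 1
--         mid = (left_bound + right_bound - 1) // 2
--         nodes_numbers[i] = 1 + nodes_numbers[mid - left_bound + 1] +\
--             nodes_numbers[right_bound - (mid + 1) + 1]
--     return nodes_numbers
-- ===== SOURCE B (Python) =====
-- def calc_nodes_numbers(n):
--     # Closed form: the recurrence yields i-1 nodes at every index i >= 1 (0 at 0).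
--     return [max(i - 1, 0) for i in range(n + 1)]
-- ===== Notes on version B (the rewrite author's own statement) =====
-- stated objective: simpler
-- what changed: Replaced the DP-array fill with its closed form: entry i is max(i-1,0), built by a single comprehension over range(n+1).
import Mathlib
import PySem

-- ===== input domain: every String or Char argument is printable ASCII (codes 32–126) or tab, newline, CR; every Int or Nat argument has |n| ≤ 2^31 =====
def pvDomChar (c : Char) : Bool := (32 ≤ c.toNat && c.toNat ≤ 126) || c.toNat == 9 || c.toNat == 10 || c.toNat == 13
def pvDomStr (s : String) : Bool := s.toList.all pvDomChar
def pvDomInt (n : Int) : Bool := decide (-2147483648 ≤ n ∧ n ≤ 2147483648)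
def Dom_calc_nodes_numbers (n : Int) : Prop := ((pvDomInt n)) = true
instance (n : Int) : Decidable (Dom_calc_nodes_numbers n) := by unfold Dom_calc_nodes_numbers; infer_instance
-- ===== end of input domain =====

-- B replaces the DP-array fill by its closed form max(i-1,0); objective: simpler.

-- ===== PORT A =====
-- pyGetD/pySetD are exact here: every index A reads or writes is in range (proved in the lemmas below).
def calc_nodes_numbers (n : Int) : List Int :=
  let init : List Int := PySem.List.pyRepeat [0] (n + 1)
  (PySem.List.pyRange 2 (n + 1) 1).foldl
    (fun ns i =>
      let left_bound : Int := 0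
      let right_bound : Int := i - 1
      let mid : Int := PySem.Int.floordiv (left_bound + right_bound - 1) 2
      PySem.List.pySetD ns i
        (1 + PySem.List.pyGetD ns (mid - left_bound + 1) 0
           + PySem.List.pyGetD ns (right_bound - (mid + 1) + 1) 0))
    init

-- ===== PORT B =====
def calc_nodes_numbers_alt (n : Int) : List Int :=
  (PySem.List.pyRange 0 (n + 1) 1).map (fun i => max (i - 1) 0)

-- ===== PRECONDITION & SPEC =====
def Spec_calc_nodes_numbers (n : Int) (out : List Int) : Prop := out = calc_nodes_numbers_alt n
instance (n : Int) (out : List Int) : Decidable (Spec_calc_nodes_numbers n out) := by unfold Spec_calc_nodes_numbers; infer_instance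

-- ===== CLAIM (what is proved, stated in full; the proofs are below) =====
def Claim_equal_calc_nodes_numbers : Prop := ∀ (n : Int), Dom_calc_nodes_numbers n → Spec_calc_nodes_numbers n (calc_nodes_numbers n)

-- ===== LEMMAS AND PROOFS =====

-- The loop invariant shape: after processing 2..k, entry j is j-1 for 2 ≤ j < k, else 0.
def pvG (m : Nat) (k : Int) : List Int :=
  (List.range m).map (fun (j : Nat) => if 2 ≤ (j : Int) ∧ (j : Int) < k then ((j : Int) - 1) else (0 : Int))

lemma pvG_length (m : Nat) (k : Int) : (pvG m k).length = m := by
  simp [pvG]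

lemma pvG_getD (m : Nat) (k j : Int) (h0 : 0 ≤ j) (hm : j < (m : Int)) :
    PySem.List.pyGetD (pvG m k) j 0 = if 2 ≤ j ∧ j < k then j - 1 else 0 := by
  have hj : j = ((j.toNat : Nat) : Int) := by omega
  rw [PySem.List.pyGetD_eq_getElem _ _ h0 (by simpa [pvG_length] using hm)]
  simp only [pvG, List.getElem_map, List.getElem_range]
  rw [← hj]

lemma pvG_two (m : Nat) : pvG m 2 = PySem.List.pyRepeat [(0:Int)] (m : Int) := by
  rw [PySem.List.pyRepeat_singleton]
  apply List.ext_getElem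
  · simp [pvG_length]
  · intro j h1 h2
    simp only [pvG, List.getElem_map, List.getElem_range, List.getElem_replicate]
    omega

-- one loop step sends pvG m k to pvG m (k+1)
lemma pvG_step (m : Nat) (k : Int) (h2 : 2 ≤ k) (hk : k < (m : Int)) :
    PySem.List.pySetD (pvG m k) k
      (1 + PySem.List.pyGetD (pvG m k) (PySem.Int.floordiv (0 + (k - 1) - 1) 2 - 0 + 1) 0
         + PySem.List.pyGetD (pvG m k) (k - 1 - (PySem.Int.floordiv (0 + (k - 1) - 1) 2 + 1) + 1) 0)
      = pvG m (k + 1) := by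
  set mid : Int := PySem.Int.floordiv (0 + (k - 1) - 1) 2 with hmid
  have hmid' : mid = (k - 2) / 2 := by
    rw [hmid, PySem.Int.floordiv_eq_ediv_of_pos (by omega)]; ring_nf
  have hmb : 0 ≤ mid ∧ 2 * mid ≤ k - 2 ∧ k - 2 < 2 * mid + 2 := by
    rw [hmid']; omega
  rw [pvG_getD m k (mid - 0 + 1) (by omega) (by omega),
      pvG_getD m k (k - 1 - (mid + 1) + 1) (by omega) (by omega),
      PySem.List.pySetD_of_nonneg _ _ (by omega)]
  apply List.ext_getElem
  · simp [pvG_length]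
  · intro j h1 h2'
    rw [List.getElem_set]
    simp only [pvG, List.getElem_map, List.getElem_range] at *
    split_ifs <;> omega

lemma pvLoop (m : Nat) (k : Int) (h2 : 2 ≤ k) (hk : k ≤ (m : Int)) :
    (PySem.List.pyRange 2 k 1).foldl
      (fun ns i =>
        PySem.List.pySetD ns i
          (1 + PySem.List.pyGetD ns (PySem.Int.floordiv (0 + (i - 1) - 1) 2 - 0 + 1) 0
             + PySem.List.pyGetD ns (i - 1 - (PySem.Int.floordiv (0 + (i - 1) - 1) 2 + 1) + 1) 0))
      (pvG m 2) = pvG m k := by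
  induction k, h2 using Int.le_induction with
  | base => simp [PySem.List.pyRange_one_eq_nil]
  | succ k hk' ih =>
    rw [PySem.List.pyRange_one_succ_right (by omega), List.foldl_append,
        ih (by omega)]
    simpa using pvG_step m k hk' (by omega)

lemma pvAlt_eq (m : Nat) (n : Int) (hm : (m : Int) = n + 1) :
    calc_nodes_numbers_alt n = pvG m (n + 1) := by
  unfold calc_nodes_numbers_alt pvG
  rw [PySem.List.pyRange_one]
  have hm' : (n + 1 - 0).toNat = m := by omega
  rw [hm']
  apply List.ext_getElem
  · simp
  · intro j h1 h2
    have hj : j < m := by simpa using h1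
    simp only [List.getElem_map, List.getElem_range]
    have : (j : Int) < n + 1 := by omega
    split_ifs <;> omega

-- ===== VERDICT (by name: the statement is the Claim_ definition above) =====
theorem calc_nodes_numbers_spec : Claim_equal_calc_nodes_numbers := by
  intro n _
  unfold Spec_calc_nodes_numbers
  by_cases h2 : 2 ≤ n
  · set m : Nat := (n + 1).toNat with hm
    have hmn : (m : Int) = n + 1 := by omega
    unfold calc_nodes_numbers
    simp only []
    rw [show (n + 1) = (m : Int) from hmn.symm, ← pvG_two m,
        pvLoop m (m : Int) (by omega) (by omega), pvAlt_eq m n hmn, hmn]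
  · -- loop range empty (n + 1 ≤ 2): A returns the zero array, B the same list
    unfold calc_nodes_numbers calc_nodes_numbers_alt
    rcases lt_trichotomy n 0 with h | h | h
    · rw [PySem.List.pyRange_one_eq_nil (by omega), PySem.List.pyRange_one_eq_nil (by omega)]
      simp [PySem.List.pyRepeat_singleton, show (n+1).toNat = 0 by omega]
    · subst h; decide
    · have : n = 1 := by omega
      subst this; decide
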